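-- pv_equiv track=rewrite | github.com/GeorgeBeshay/ai-8puzzle | ai-8puzzle/src/state/state_utilities.py | convert_int_to_1d
-- ===== SOURCE A (Python) =====
-- from typing import List
--
-- def convert_int_to_1d(int_state: int) -> List[int]:
--     """
--     Converts the int game state and return the 1D game state.
--
--     Args:
--         int_state (int): An integer input value.
--
--     Returns:
--         List[int]: A 1D output array (list of integers).
--     """
--     result = []
--     while int_state != 0:
--         # Extract each 4 bits (which represents a number) and put it in the array
--         result = result + [int_state & 15]
--         int_state = int_state >> 4
--     if len(result) < 9:
--         result = result + [0]
--     return result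
-- ===== SOURCE B (Python) =====
-- def convert_int_to_1d(int_state: int) -> list:
--     if int_state == 0:
--         return [0]
--     result = [int(c, 16) for c in reversed(hex(int_state)[2:])]
--     if len(result) < 9:
--         result.append(0)
--     return result
-- ===== Notes on version B (the rewrite author's own statement) =====
-- stated objective: idiomatic
-- what changed: Replaces the bit-shift while-loop (with quadratic 'result + [...]' list rebuilding) by Python's own hex() conversion read least-significant-digit first via a comprehension, with the no-digits corner special-cased.
import Mathlib
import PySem

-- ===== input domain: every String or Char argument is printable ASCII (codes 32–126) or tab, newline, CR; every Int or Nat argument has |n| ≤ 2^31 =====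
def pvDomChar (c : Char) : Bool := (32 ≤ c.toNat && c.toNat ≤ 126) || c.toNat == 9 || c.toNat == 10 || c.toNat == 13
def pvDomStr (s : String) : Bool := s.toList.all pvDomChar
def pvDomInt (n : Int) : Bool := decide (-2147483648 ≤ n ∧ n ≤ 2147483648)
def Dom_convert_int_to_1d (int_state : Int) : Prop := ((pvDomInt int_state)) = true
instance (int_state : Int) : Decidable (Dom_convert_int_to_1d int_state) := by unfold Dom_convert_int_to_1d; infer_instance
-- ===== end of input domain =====

-- B replaces A's bit-shift while-loop with Python's own hex() conversion read back digit by digit (idiomatic; same result).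

-- ===== PORT A =====
-- the while-loop of A; on negative input Python never terminates (excluded by Pre_),
-- so the guard here demands a positive int_state purely to make the recursion total — exiting otherwise exactly as Python's loop condition does.
def convert_int_to_1d_loop (int_state : Int) (result : List Int) : List Int :=
  if h : 0 < int_state then
    convert_int_to_1d_loop (int_state >>> (4:Nat)) (result ++ [PySem.Int.band int_state 15])
  else result
termination_by int_state.toNat
decreasing_by
  have h16 : int_state >>> (4:Nat) = ((int_state.toNat >>> 4 : Nat) : Int) := by
    rw [← Int.toNat_of_nonneg (le_of_lt h)]; simp [Int.natCast_shiftRight]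
  rw [h16]; simp only [Int.toNat_natCast]
  have : int_state.toNat >>> 4 = int_state.toNat / 16 := by
    simp [Nat.shiftRight_eq_div_pow]
  omega

def convert_int_to_1d (int_state : Int) : List Int :=
  let result := convert_int_to_1d_loop int_state []
  if result.length < 9 then result ++ [0] else result

-- ===== PORT B =====
-- hand port of hex(n)[2:] for positive n: lowercase hex digits, most significant first (exact there)
def hexDigitChar (d : Nat) : Char :=
  (['0','1','2','3','4','5','6','7','8','9','a','b','c','d','e','f']).getD d '0'

def hexChars (n : Nat) : List Char :=
  if n = 0 then [] else hexChars (n / 16) ++ [hexDigitChar (n % 16)]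

-- int(c, 16); within Pre_ c is always a hex digit so ofCharsBase? is some (getD 0 marks the unreached ValueError)
def hexCharVal (c : Char) : Int := (PySem.Int.ofCharsBase? [c] 16).getD 0

def convert_int_to_1d_alt (int_state : Int) : List Int :=
  if int_state = 0 then [0]
  else
    let result := (hexChars int_state.toNat).reverse.map hexCharVal
    if result.length < 9 then result ++ [0] else result

-- ===== PRECONDITION & SPEC =====
-- Pre_ excludes negative int_state, on which A's while-loop never terminates (the shifted value stays negative).
def Pre_convert_int_to_1d (int_state : Int) : Prop := 0 ≤ int_state
instance (int_state : Int) : Decidable (Pre_convert_int_to_1d int_state) := by unfold Pre_convert_int_to_1d; infer_instance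
def pvWitness_convert_int_to_1d : Int := (42)

def Spec_convert_int_to_1d (int_state : Int) (out : List Int) : Prop := out = convert_int_to_1d_alt int_state
instance (int_state : Int) (out : List Int) : Decidable (Spec_convert_int_to_1d int_state out) := by unfold Spec_convert_int_to_1d; infer_instance

-- ===== CLAIM (what is proved, stated in full; the proofs are below) =====
def Claim_equal_convert_int_to_1d : Prop := ∀ (int_state : Int), Dom_convert_int_to_1d int_state → Pre_convert_int_to_1d int_state → Spec_convert_int_to_1d int_state (convert_int_to_1d int_state)

-- ===== LEMMAS AND PROOFS =====

theorem hexCharVal_digit (d : Nat) (hd : d < 16) : hexCharVal (hexDigitChar d) = (d : Int) := by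
  interval_cases d <;> decide

theorem loop_eq_hex (m : Nat) : ∀ (acc : List Int),
    convert_int_to_1d_loop (m : Int) acc = acc ++ (hexChars m).reverse.map hexCharVal := by
  induction m using Nat.strong_induction_on with
  | _ m ih =>
    intro acc
    by_cases hm : m = 0
    · subst hm
      rw [convert_int_to_1d_loop, hexChars]
      simp
    · have hpos : 0 < (m : Int) := by exact_mod_cast Nat.pos_of_ne_zero hm
      rw [convert_int_to_1d_loop]
      rw [dif_pos hpos]
      have hshift : (m : Int) >>> (4:Nat) = ((m / 16 : Nat) : Int) := by
        rw [show m / 16 = m >>> 4 by simp [Nat.shiftRight_eq_div_pow]]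
        exact (Int.natCast_shiftRight m 4).symm
      have hband : PySem.Int.band (m : Int) 15 = ((m % 16 : Nat) : Int) := by
        have h1 : PySem.Int.band (m : Int) ((15:Nat) : Int) = ((m &&& 15 : Nat) : Int) :=
          PySem.Int.band_natCast m 15
        have h2 : m &&& 15 = m % 16 := by
          have := Nat.and_two_pow_sub_one_eq_mod m 4
          norm_num at this
          exact this
        rw [h2] at h1; exact_mod_cast h1
      rw [hshift, hband, ih (m / 16) (Nat.div_lt_self (Nat.pos_of_ne_zero hm) (by norm_num))]
      conv_rhs => rw [hexChars, if_neg hm]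
      rw [List.reverse_append, List.map_append]
      simp [hexCharVal_digit (m % 16) (Nat.mod_lt m (by norm_num))]

-- ===== VERDICT (by name: the statement is the Claim_ definition above) =====
theorem convert_int_to_1d_spec : Claim_equal_convert_int_to_1d := by
  intro n _ hpre
  unfold Spec_convert_int_to_1d convert_int_to_1d convert_int_to_1d_alt
  obtain ⟨m, rfl⟩ : ∃ m : Nat, n = (m : Int) := ⟨n.toNat, (Int.toNat_of_nonneg hpre).symm⟩
  by_cases hm : m = 0
  · subst hm
    rw [loop_eq_hex, hexChars]
    simp
  · rw [loop_eq_hex, if_neg (show ¬(m:Int) = 0 from by exact_mod_cast hm)]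
    simp
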